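-- pv_equiv track=rewrite | github.com/Twodragon0/tech-blog | scripts/auto_publish_news.py | _deduplicate_crypto_stories
-- ===== SOURCE A (Python) =====
-- from typing import Dict, List, Optional
--
-- def _deduplicate_crypto_stories(items: List[Dict]) -> List[Dict]:
--     """Group related Bitcoin/crypto crash stories and keep only the 2 most substantive"""
--     crypto_keywords = ["bitcoin", "btc", "crypto", "cryptocurrency"]
--     price_keywords = [
--         "crash",
--         "drop",
--         "fall",
--         "plunge",
--         "dump",
--         "price",
--         "surge",
--         "rally",
--     ]
--
--     crypto_price_items = []
--     other_items = []
--
--     for item in items: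
--         text = f"{item.get('title', '')} {item.get('summary', '')}".lower()
--         is_crypto = any(kw in text for kw in crypto_keywords)
--         is_price = any(kw in text for kw in price_keywords)
--         category = item.get("category", "")
--
--         if category == "blockchain" and is_crypto and is_price:
--             crypto_price_items.append(item)
--         else:
--             other_items.append(item)
--
--     if len(crypto_price_items) >= 3:
--         # Keep the 2 most substantive (longest summary + content)
--         crypto_price_items.sort(
--             key=lambda x: len(x.get("summary", "")) + len(x.get("content", "")),
--             reverse=True,
--         )
--         other_items.extend(crypto_price_items[:2])
--     else:
--         other_items.extend(crypto_price_items)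
--
--     return other_items
-- ===== SOURCE B (Python) =====
-- from typing import Dict, List, Optional
--
-- def _deduplicate_crypto_stories(items: List[Dict]) -> List[Dict]:
--     """Group related Bitcoin/crypto crash stories and keep only the 2 most substantive"""
--     crypto_keywords = ["bitcoin", "btc", "crypto", "cryptocurrency"]
--     price_keywords = [
--         "crash",
--         "drop",
--         "fall",
--         "plunge",
--         "dump",
--         "price",
--         "surge",
--         "rally",
--     ]
--
--     def _is_crypto_price(item):
--         text = f"{item.get('title', '')} {item.get('summary', '')}".lower()
--         return (
--             item.get("category", "") == "blockchain"
--             and any(kw in text for kw in crypto_keywords)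
--             and any(kw in text for kw in price_keywords)
--         )
--
--     def _score(item):
--         return len(item.get("summary", "")) + len(item.get("content", ""))
--
--     crypto_price_items = [it for it in items if _is_crypto_price(it)]
--     other_items = [it for it in items if not _is_crypto_price(it)]
--
--     if len(crypto_price_items) >= 3:
--         # one linear scan keeping the two highest-scoring items (ties: earlier wins)
--         best = None
--         second = None
--         for it in crypto_price_items:
--             if best is None:
--                 best, second = it, None
--             elif _score(it) > _score(best):
--                 best, second = it, best
--             elif second is None or _score(it) > _score(second):
--                 second = it
--         other_items.extend([best, second])
--     else:
--         other_items.extend(crypto_price_items)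
--
--     return other_items
-- ===== Notes on version B (the rewrite author's own statement) =====
-- stated objective: alternative
-- what changed: The partition loop becomes two list comprehensions and the sort-then-take-2 of the crypto-price group is replaced by a single linear scan that maintains the two highest-scoring items (strict > so the earlier item wins ties, matching the stable reverse sort).
import Mathlib
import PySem

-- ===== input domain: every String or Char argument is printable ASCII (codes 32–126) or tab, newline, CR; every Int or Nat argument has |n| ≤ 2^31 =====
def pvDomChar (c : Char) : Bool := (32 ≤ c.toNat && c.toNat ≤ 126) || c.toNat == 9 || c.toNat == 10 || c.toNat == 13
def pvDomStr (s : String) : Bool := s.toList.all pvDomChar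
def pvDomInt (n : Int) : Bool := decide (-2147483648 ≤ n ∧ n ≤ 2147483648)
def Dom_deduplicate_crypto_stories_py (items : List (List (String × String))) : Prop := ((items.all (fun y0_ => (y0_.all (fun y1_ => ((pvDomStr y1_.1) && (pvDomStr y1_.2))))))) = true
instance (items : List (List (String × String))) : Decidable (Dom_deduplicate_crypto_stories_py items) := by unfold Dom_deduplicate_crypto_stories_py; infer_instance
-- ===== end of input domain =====

-- B replaces A's sort-then-slice of the crypto-price group by two list comprehensions for the
-- partition and a single linear scan keeping the two highest-scoring items (alternative decomposition).


-- ===== PORT A =====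
def pvA_keep (item : List (String × String)) : Bool :=
  let text := PySem.Str.lower
    ((PySem.Dict.mk item).getD "title" "" ++ " " ++ (PySem.Dict.mk item).getD "summary" "")
  let is_crypto := ["bitcoin", "btc", "crypto", "cryptocurrency"].any (fun kw => PySem.Str.isIn kw text)
  let is_price := ["crash", "drop", "fall", "plunge", "dump", "price", "surge", "rally"].any
    (fun kw => PySem.Str.isIn kw text)
  let category := (PySem.Dict.mk item).getD "category" ""
  category == "blockchain" && is_crypto && is_price

def pvA_len_key (x : List (String × String)) : Int :=
  PySem.Str.len ((PySem.Dict.mk x).getD "summary" "") + PySem.Str.len ((PySem.Dict.mk x).getD "content" "")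

def deduplicate_crypto_stories_py (items : List (List (String × String))) : List (List (String × String)) :=
  let st := items.foldl
    (fun (s : List (List (String × String)) × List (List (String × String))) item =>
      if pvA_keep item then (s.1 ++ [item], s.2) else (s.1, s.2 ++ [item]))
    ([], [])
  let crypto_price_items := st.1
  let other_items := st.2
  if 3 ≤ PySem.List.len crypto_price_items then
    other_items ++ PySem.List.slice (PySem.List.sorted crypto_price_items pvA_len_key true) none (some 2)
  else
    other_items ++ crypto_price_items

-- ===== PORT B =====
def pvB_is_crypto_price (item : List (String × String)) : Bool :=
  let text := PySem.Str.lower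
    ((PySem.Dict.mk item).getD "title" "" ++ " " ++ (PySem.Dict.mk item).getD "summary" "")
  (PySem.Dict.mk item).getD "category" "" == "blockchain"
    && ["bitcoin", "btc", "crypto", "cryptocurrency"].any (fun kw => PySem.Str.isIn kw text)
    && ["crash", "drop", "fall", "plunge", "dump", "price", "surge", "rally"].any
        (fun kw => PySem.Str.isIn kw text)

def pvB_score (item : List (String × String)) : Int :=
  PySem.Str.len ((PySem.Dict.mk item).getD "summary" "") + PySem.Str.len ((PySem.Dict.mk item).getD "content" "")

-- one step of the linear top-2 scan ('best'/'second' as options, strict '>' so earlier items win ties)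
def pvB_step (st : Option (List (String × String)) × Option (List (String × String)))
    (it : List (String × String)) :
    Option (List (String × String)) × Option (List (String × String)) :=
  match st with
  | (none, _) => (some it, none)
  | (some b, none) => if pvB_score b < pvB_score it then (some it, some b) else (some b, some it)
  | (some b, some s) =>
      if pvB_score b < pvB_score it then (some it, some b)
      else if pvB_score s < pvB_score it then (some b, some it)
      else (some b, some s)

def deduplicate_crypto_stories_py_alt (items : List (List (String × String))) : List (List (String × String)) :=
  let crypto_price_items := items.filter (fun it => pvB_is_crypto_price it)
  let other_items := items.filter (fun it => !pvB_is_crypto_price it)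
  if 3 ≤ PySem.List.len crypto_price_items then
    let st := crypto_price_items.foldl pvB_step (none, none)
    other_items ++ (st.1.toList ++ st.2.toList)
  else
    other_items ++ crypto_price_items

-- ===== PRECONDITION & SPEC =====
def Spec_deduplicate_crypto_stories_py (items : List (List (String × String))) (out : List (List (String × String))) : Prop := out = deduplicate_crypto_stories_py_alt items
instance (items : List (List (String × String))) (out : List (List (String × String))) : Decidable (Spec_deduplicate_crypto_stories_py items out) := by unfold Spec_deduplicate_crypto_stories_py; infer_instance

-- ===== CLAIM (what is proved, stated in full; the proofs are below) =====
def Claim_equal_deduplicate_crypto_stories_py : Prop := ∀ (items : List (List (String × String))), Dom_deduplicate_crypto_stories_py items → Spec_deduplicate_crypto_stories_py items (deduplicate_crypto_stories_py items)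

-- ===== LEMMAS AND PROOFS =====

-- the two keep-tests are the same Boolean
theorem pv_keep_eq (item : List (String × String)) : pvA_keep item = pvB_is_crypto_price item := by
  simp [pvA_keep, pvB_is_crypto_price]

-- first two elements of a list, as the scan's state
def pvTop2 (l : List (List (String × String))) :
    Option (List (String × String)) × Option (List (String × String)) :=
  match l with
  | [] => (none, none)
  | [a] => (some a, none)
  | a :: b :: _ => (some a, some b)

theorem pv_step_insertBy (S : List (List (String × String))) (x : List (String × String)) :
    pvTop2 (PySem.List.insertBy (fun a b => decide (pvA_len_key b < pvA_len_key a)) x S)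
      = pvB_step (pvTop2 S) x := by
  match S with
  | [] => rfl
  | [a] =>
      simp only [PySem.List.insertBy, pvTop2, pvB_step, pvB_score, pvA_len_key]
      split_ifs <;> ((try rfl); (try simp_all); (try (exfalso; omega)))
  | a :: b :: rest =>
      simp only [PySem.List.insertBy, pvTop2, pvB_step, pvB_score, pvA_len_key]
      split_ifs <;> ((try rfl); (try simp_all); (try (exfalso; omega)))

theorem pv_scan_eq_top2 (l S : List (List (String × String))) :
    l.foldl pvB_step (pvTop2 S)
      = pvTop2 (l.foldl (fun acc x => PySem.List.insertBy (fun a b => decide (pvA_len_key b < pvA_len_key a)) x acc) S) := by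
  induction l generalizing S with
  | nil => rfl
  | cons x l ih =>
      simp only [List.foldl_cons, ← pv_step_insertBy S x]
      exact ih _

-- A's partition fold is B's pair of filters
theorem pv_partition_eq (items : List (List (String × String))) :
    items.foldl
      (fun (s : List (List (String × String)) × List (List (String × String))) item =>
        if pvA_keep item then (s.1 ++ [item], s.2) else (s.1, s.2 ++ [item]))
      ([], [])
    = (items.filter (fun it => pvB_is_crypto_price it),
       items.filter (fun it => !pvB_is_crypto_price it)) := by
  have h : ∀ (s : List (List (String × String)) × List (List (String × String))) item,
      (if pvA_keep item then (s.1 ++ [item], s.2) else (s.1, s.2 ++ [item]))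
      = ((if pvB_is_crypto_price item then s.1 ++ [item] else s.1),
         (if pvB_is_crypto_price item then s.2 else s.2 ++ [item])) := by
    intro s item
    rw [pv_keep_eq]
    split_ifs <;> rfl
  rw [PySem.List.foldl_congr_mem _ _ _ _ (fun acc x _ => h acc x)]
  rw [PySem.List.foldl_prod_mk
    (f := fun acc item => if pvB_is_crypto_price item then acc ++ [item] else acc)
    (g := fun acc item => if pvB_is_crypto_price item then acc else acc ++ [item])]
  simp only [Prod.mk.injEq]
  refine ⟨?_, ?_⟩
  · simpa using PySem.List.foldl_append_if_eq_filter (fun it => pvB_is_crypto_price it) items []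
  · have := PySem.List.foldl_if_eq_foldl_filter (l := items)
      (p := fun it => !pvB_is_crypto_price it)
      (f := fun (acc : List (List (String × String))) item => acc ++ [item]) (init := ([] : List (List (String × String))))
    simp only [Bool.not_eq_true'] at this ⊢
    calc items.foldl (fun acc item => if pvB_is_crypto_price item then acc else acc ++ [item]) []
        = items.foldl (fun acc item => if (!pvB_is_crypto_price item) then acc ++ [item] else acc) [] := by
          apply PySem.List.foldl_congr_mem; intro acc x _; by_cases h : pvB_is_crypto_price x <;> simp [h]
      _ = _ := by
          simpa using PySem.List.foldl_append_if_eq_filter (fun it => !pvB_is_crypto_price it) items []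

-- ===== VERDICT (by name: the statement is the Claim_ definition above) =====
theorem deduplicate_crypto_stories_py_spec : Claim_equal_deduplicate_crypto_stories_py := by
  intro items _
  unfold Spec_deduplicate_crypto_stories_py deduplicate_crypto_stories_py deduplicate_crypto_stories_py_alt
  rw [pv_partition_eq]
  set crypto := items.filter (fun it => pvB_is_crypto_price it) with hc
  by_cases h3 : 3 ≤ PySem.List.len crypto
  · simp only [if_pos h3]
    congr 1
    -- A's sorted-take-2 equals B's scan
    have hscan : List.foldl pvB_step (none, none) crypto
        = pvTop2 (PySem.List.sorted crypto pvA_len_key true) := by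
      have := pv_scan_eq_top2 crypto []
      rw [← PySem.List.sorted_rev_eq_foldl_insertBy crypto pvA_len_key] at this
      exact this
    have hlen : 2 ≤ (PySem.List.sorted crypto pvA_len_key true).length := by
      rw [(PySem.List.sorted_perm crypto pvA_len_key true).length_eq]
      simp only [PySem.List.len_eq] at h3; omega
    rw [PySem.List.slice_to _ (by norm_num : (0:Int) ≤ 2), hscan]
    obtain ⟨a, b, rest, hs⟩ : ∃ a b rest, PySem.List.sorted crypto pvA_len_key true = a :: b :: rest := by
      match hx : PySem.List.sorted crypto pvA_len_key true, hlen with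
      | a :: b :: rest, _ => exact ⟨a, b, rest, rfl⟩
    rw [hs]
    rfl
  · simp only [if_neg h3]
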